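-- pv_equiv track=rewrite | github.com/AHMEDELZARIA/LLVM-evolution | Analyze_Clusters.py | compare_cluster_lists
-- ===== SOURCE A (Python) =====
-- def compare_cluster_lists(program_clusters):
--
--     # List to store list of consistent clusters
--     consistent_clusters = []
--
--     # Iterate over each program in program_clusters
--     for program_name, clusters in program_clusters.items():
--
--         # Tracks if a program is repeated in the main list
--         repeats = False
--
--         # To ensure no repetitions, check if current_program name is not in main list already
--         for sub_list in consistent_clusters:
--
--             # If it is in one of the sublist, update state of repeats to True and break out
--             if program_name in sub_list:
--
--                 repeats = True
--                 break
--
--         # If no repeats, start checking for consistency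
--         if repeats == False:
--
--             # Sublist to store programs that are consistent with current program
--             current_matches = [program_name]
--
--             # Iterate over all other programs
--             for other_program, other_clusters in program_clusters.items():
--
--                 # As long as it's not the same program
--                 if program_name != other_program:
--
--                     # If the set of clusters is the same, note down consistency
--                     if set(clusters) == set(other_clusters):
--
--                         current_matches.append(other_program)
--
--             # If matches were found, append, else don't
--             if len(current_matches) > 1:
--                 # Append current matches to main list
--                 consistent_clusters.append(current_matches)
--
--         # Else skip to next program as current program already in a consistency list
--         else:
--
--             continue
--
--     return consistent_clusters
-- ===== SOURCE B (Python) =====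
-- def compare_cluster_lists(program_clusters):
--     groups = {}
--     for name, clusters in program_clusters.items():
--         groups.setdefault(tuple(sorted(set(clusters))), []).append(name)
--     return [g for g in groups.values() if len(g) > 1]
-- ===== Notes on version B (the rewrite author's own statement) =====
-- stated objective: faster
-- what changed: replaces A's nested O(n^2) scans (membership scan over already-built groups plus a full rescan comparing cluster sets for every program) with a single pass that hash-groups names by a canonical key tuple(sorted(set(clusters))) and then keeps the groups of size > 1
import Mathlib
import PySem

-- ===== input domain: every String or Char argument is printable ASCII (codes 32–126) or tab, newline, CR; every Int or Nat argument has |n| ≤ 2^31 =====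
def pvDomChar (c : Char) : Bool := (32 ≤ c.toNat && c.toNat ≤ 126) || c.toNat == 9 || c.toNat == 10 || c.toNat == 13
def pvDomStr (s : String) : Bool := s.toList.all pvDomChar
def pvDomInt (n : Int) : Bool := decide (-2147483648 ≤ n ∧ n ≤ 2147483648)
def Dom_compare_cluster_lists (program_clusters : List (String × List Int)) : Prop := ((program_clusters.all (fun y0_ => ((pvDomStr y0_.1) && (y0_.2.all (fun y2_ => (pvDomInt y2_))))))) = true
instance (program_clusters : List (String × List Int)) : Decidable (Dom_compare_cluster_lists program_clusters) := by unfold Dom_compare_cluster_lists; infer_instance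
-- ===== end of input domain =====

-- B replaces A's nested scans by one pass that groups the names under the canonical key
-- sorted(set(clusters)) in a dict and keeps the groups of size > 1.

-- ===== PORT A =====
def compare_cluster_lists (program_clusters : List (String × List Int)) : List (List String) :=
  program_clusters.foldl (fun consistent_clusters p =>
    -- 'for sub_list in consistent_clusters: if program_name in sub_list: repeats = True; break'
    let repeats := consistent_clusters.any (fun sub_list => sub_list.contains p.1)
    if repeats = false then
      -- 'current_matches = [program_name]', then the inner scan over all items
      let current_matches := program_clusters.foldl (fun cur q =>
        if p.1 != q.1 then
          if PySem.Set.equal (PySem.Set.ofList p.2) (PySem.Set.ofList q.2) then cur ++ [q.1] else cur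
        else cur) [p.1]
      if 1 < current_matches.length then consistent_clusters ++ [current_matches] else consistent_clusters
    else consistent_clusters) []

-- ===== PORT B =====
-- tuple(sorted(set(clusters)))
def pvKey (c : List Int) : List Int := PySem.List.sorted (PySem.Set.ofList c) (fun x => x) false

def compare_cluster_lists_alt (program_clusters : List (String × List Int)) : List (List String) :=
  -- 'groups.setdefault(key, []).append(name)', i.e. groups[key] = groups.get(key, []) + [name]
  let groups := program_clusters.foldl
    (fun d p => PySem.Dict.modify d (pvKey p.2) [] (· ++ [p.1])) PySem.Dict.empty
  (PySem.Dict.values groups).filter (fun g => decide (1 < g.length))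

-- ===== PRECONDITION & SPEC =====
-- Pre_ excludes association lists with duplicate program names: the Python argument is a dict,
-- which cannot hold two entries with the same key, so such lists represent no dict input of A.
def Pre_compare_cluster_lists (program_clusters : List (String × List Int)) : Prop :=
  (program_clusters.map Prod.fst).Nodup
instance (program_clusters : List (String × List Int)) : Decidable (Pre_compare_cluster_lists program_clusters) := by unfold Pre_compare_cluster_lists; infer_instance

def pvWitness_compare_cluster_lists : (List (String × List Int)) :=
  [("a", [1, 2]), ("b", [2, 1, 1]), ("c", [3])]

def Spec_compare_cluster_lists (program_clusters : List (String × List Int)) (out : List (List String)) : Prop := out = compare_cluster_lists_alt program_clusters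
instance (program_clusters : List (String × List Int)) (out : List (List String)) : Decidable (Spec_compare_cluster_lists program_clusters out) := by unfold Spec_compare_cluster_lists; infer_instance

-- ===== CLAIM (what is proved, stated in full; the proofs are below) =====
def Claim_equal_compare_cluster_lists : Prop := ∀ (program_clusters : List (String × List Int)), Dom_compare_cluster_lists program_clusters → Pre_compare_cluster_lists program_clusters → Spec_compare_cluster_lists program_clusters (compare_cluster_lists program_clusters)

-- ===== LEMMAS AND PROOFS =====

-- names of the programs of l whose canonical key is k, in order
def pvGrp (l : List (String × List Int)) (k : List Int) : List String :=
  (l.filter (fun q => pvKey q.2 == k)).map Prod.fst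

-- the distinct canonical keys of l, in first-occurrence order
def pvKeys (l : List (String × List Int)) : List (List Int) :=
  PySem.Set.ofList (l.map (fun p => pvKey p.2))

-- A's accumulator after the prefix `pref` of the full list `l`
def pvOut (l pref : List (String × List Int)) : List (List String) :=
  ((pvKeys pref).map (pvGrp l)).filter (fun g => decide (1 < g.length))

theorem pv_equal_iff_key (a b : List Int) :
    PySem.Set.equal (PySem.Set.ofList a) (PySem.Set.ofList b) = true ↔ pvKey a = pvKey b := by
  rw [PySem.Set.equal_iff]
  unfold pvKey
  rw [PySem.List.sorted_id_eq_sorted_id_iff_perm,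
    List.perm_ext_iff_of_nodup (PySem.Set.nodup_ofList a) (PySem.Set.nodup_ofList b)]

theorem pv_B_eq (l : List (String × List Int)) :
    compare_cluster_lists_alt l = pvOut l l := by
  unfold compare_cluster_lists_alt pvOut
  have hfold : l.foldl (fun d p => PySem.Dict.modify d (pvKey p.2) [] (· ++ [p.1])) PySem.Dict.empty
      = (l.map (fun p => (pvKey p.2, p.1))).foldl
          (fun d p => PySem.Dict.modify d p.1 [] (· ++ [p.2])) PySem.Dict.empty := by
    rw [List.foldl_map]
  rw [hfold]
  set m := l.map (fun p => (pvKey p.2, p.1)) with hm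
  set D := m.foldl (fun d p => PySem.Dict.modify d p.1 [] (· ++ [p.2])) PySem.Dict.empty with hD
  have hkeys : D.keys = pvKeys l := by
    rw [hD, PySem.Dict.keys_foldl_modify_key m Prod.fst [] (fun d p v => v ++ [p.2]),
      PySem.Dict.keys_empty, PySem.Set.update_nil_left, hm, List.map_map]
    rfl
  have hnd : D.keys.Nodup := by
    rw [hD]
    exact PySem.Dict.nodup_keys_foldl_modify_key m Prod.fst [] _ _ PySem.Dict.nodup_keys_empty
  have hget : ∀ k, D.getD k [] = pvGrp l k := by
    intro k
    rw [hD, PySem.Dict.getD_foldl_modify_append, hm, List.filter_map, List.map_map]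
    simp [pvGrp]
    rfl
  show List.filter _ D.values = _
  rw [PySem.Dict.values_eq_map_keys D hnd [], hkeys]
  congr 1
  exact List.map_congr_left (fun k _ => hget k)

-- two distinct members force length > 1
theorem pv_two_mem {α : Type} {xs : List α} {a b : α} (ha : a ∈ xs) (hb : b ∈ xs)
    (hne : a ≠ b) : 1 < xs.length := by
  match xs with
  | [] => simp at ha
  | [x] => simp at ha hb; exact absurd (ha.trans hb.symm) hne
  | x :: y :: t => simp

-- the inner scan of A, as a filter
theorem pv_inner (p : String × List Int) (l : List (String × List Int))
    (init : List String) :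
    l.foldl (fun cur q =>
        if p.1 != q.1 then
          if PySem.Set.equal (PySem.Set.ofList p.2) (PySem.Set.ofList q.2) then cur ++ [q.1] else cur
        else cur) init
      = init ++ (l.filter (fun q =>
          p.1 != q.1 && PySem.Set.equal (PySem.Set.ofList p.2) (PySem.Set.ofList q.2))).map Prod.fst := by
  induction l generalizing init with
  | nil => simp
  | cons q t ih =>
    rw [List.foldl_cons, List.filter_cons, ih]
    by_cases h1 : (p.1 != q.1) = true
    · by_cases h2 : PySem.Set.equal (PySem.Set.ofList p.2) (PySem.Set.ofList q.2) = true
      · simp [h1, h2]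
      · have h2' : PySem.Set.equal (PySem.Set.ofList p.2) (PySem.Set.ofList q.2) = false :=
          eq_false_of_ne_true h2
        simp [h1, h2']
    · have h1' : (p.1 != q.1) = false := eq_false_of_ne_true h1
      simp [h1']

-- a name determines its clusters under Nodup of the names
theorem pv_fst_inj {l : List (String × List Int)} (hnd : (l.map Prod.fst).Nodup)
    {a : String} {b c : List Int} (hb : (a, b) ∈ l) (hc : (a, c) ∈ l) : b = c := by
  induction l with
  | nil => simp at hb
  | cons x t ih =>
    rw [List.map_cons, List.nodup_cons] at hnd
    obtain ⟨hx, hnd⟩ := hnd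
    rcases List.mem_cons.1 hb with hb1 | hb'
    · subst hb1
      rcases List.mem_cons.1 hc with hc1 | hc'
      · exact ((Prod.ext_iff.mp hc1).2).symm
      · exact absurd (List.mem_map.mpr ⟨(a, c), hc', rfl⟩) hx
    · rcases List.mem_cons.1 hc with hc1 | hc'
      · subst hc1
        exact absurd (List.mem_map.mpr ⟨(a, b), hb', rfl⟩) hx
      · exact ih hnd hb' hc'

theorem pv_mem_grp {l : List (String × List Int)} {k : List Int} {s : String} :
    s ∈ pvGrp l k ↔ ∃ c, (s, c) ∈ l ∧ pvKey c = k := by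
  simp only [pvGrp, List.mem_map, List.mem_filter, beq_iff_eq]
  constructor
  · rintro ⟨⟨a, c⟩, ⟨hm, hk⟩, rfl⟩; exact ⟨c, hm, hk⟩
  · rintro ⟨c, hm, hk⟩; exact ⟨(s, c), ⟨hm, hk⟩, rfl⟩

theorem pv_repeats {l pref : List (String × List Int)} {p : String × List Int}
    (hnd : (l.map Prod.fst).Nodup) (hp : p ∈ l) :
    ((pvOut l pref).any (fun sub => sub.contains p.1) = true) ↔
      (pvKey p.2 ∈ pvKeys pref ∧ 1 < (pvGrp l (pvKey p.2)).length) := by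
  simp only [pvOut, List.any_eq_true, List.mem_filter, List.mem_map, decide_eq_true_eq]
  constructor
  · rintro ⟨sub, ⟨⟨k, hk, rfl⟩, hlen⟩, hmemb⟩
    have hmem : p.1 ∈ pvGrp l k := by simpa using hmemb
    obtain ⟨c, hcl, hck⟩ := pv_mem_grp.mp hmem
    have hc : c = p.2 := pv_fst_inj hnd hcl hp
    subst hc
    exact ⟨hck ▸ hk, hck ▸ hlen⟩
  · rintro ⟨hk, hlen⟩
    exact ⟨pvGrp l (pvKey p.2), ⟨⟨_, hk, rfl⟩, hlen⟩,
      by simpa using pv_mem_grp.mpr ⟨p.2, hp, rfl⟩⟩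

theorem pv_ne_pref {l pref rest : List (String × List Int)} {p q : String × List Int}
    (hl : l = pref ++ p :: rest) (hnd : (l.map Prod.fst).Nodup) (hq : q ∈ pref) :
    q.1 ≠ p.1 := by
  subst hl
  rw [List.map_append, List.nodup_append] at hnd
  exact hnd.2.2 q.1 (List.mem_map.mpr ⟨q, hq, rfl⟩) p.1 (by simp)

theorem pv_ne_rest {l pref rest : List (String × List Int)} {p q : String × List Int}
    (hl : l = pref ++ p :: rest) (hnd : (l.map Prod.fst).Nodup) (hq : q ∈ rest) :
    p.1 ≠ q.1 := by
  subst hl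
  rw [List.map_append, List.nodup_append] at hnd
  have := hnd.2.1
  rw [List.map_cons, List.nodup_cons] at this
  intro h
  exact this.1 (List.mem_map.mpr ⟨q, hq, h.symm⟩)

-- A's loop body, with the full list l as the inner-scan source
def pvBody (l : List (String × List Int)) (consistent_clusters : List (List String))
    (p : String × List Int) : List (List String) :=
  let repeats := consistent_clusters.any (fun sub_list => sub_list.contains p.1)
  if repeats = false then
    let current_matches := l.foldl (fun cur q =>
      if p.1 != q.1 then
        if PySem.Set.equal (PySem.Set.ofList p.2) (PySem.Set.ofList q.2) then cur ++ [q.1] else cur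
      else cur) [p.1]
    if 1 < current_matches.length then consistent_clusters ++ [current_matches] else consistent_clusters
  else consistent_clusters

theorem pv_A_unfold (l : List (String × List Int)) :
    compare_cluster_lists l = l.foldl (pvBody l) [] := rfl

theorem pv_step {l pref rest : List (String × List Int)} {p : String × List Int}
    (hl : l = pref ++ p :: rest) (hnd : (l.map Prod.fst).Nodup) :
    pvBody l (pvOut l pref) p = pvOut l (pref ++ [p]) := by
  have hp : p ∈ l := by rw [hl]; exact List.mem_append_right _ List.mem_cons_self
  have hkeys : pvKeys (pref ++ [p]) = PySem.Set.add (pvKeys pref) (pvKey p.2) := by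
    unfold pvKeys
    rw [List.map_append]
    simp only [List.map_cons, List.map_nil]
    rw [PySem.Set.ofList_append_singleton]
  by_cases hmem : pvKey p.2 ∈ pvKeys pref
  · -- already grouped: the group has ≥ 2 members, repeats fires, both sides unchanged
    obtain ⟨q, hq, hqk⟩ : ∃ q ∈ pref, pvKey q.2 = pvKey p.2 := by
      simpa [pvKeys, PySem.Set.mem_ofList, List.mem_map] using hmem
    have hlen : 1 < (pvGrp l (pvKey p.2)).length := by
      have hql : q ∈ l := by rw [hl]; exact List.mem_append_left _ hq
      have h1 : q.1 ∈ pvGrp l (pvKey p.2) := pv_mem_grp.mpr ⟨q.2, hql, hqk⟩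
      have h2 : p.1 ∈ pvGrp l (pvKey p.2) := pv_mem_grp.mpr ⟨p.2, hp, rfl⟩
      exact pv_two_mem h1 h2 (pv_ne_pref hl hnd hq)
    have hrep : (pvOut l pref).any (fun sub => sub.contains p.1) = true :=
      (pv_repeats hnd hp).mpr ⟨hmem, hlen⟩
    unfold pvBody
    rw [hrep]
    simp only [pvOut, hkeys, PySem.Set.add_of_mem hmem]
    rfl
  · -- first occurrence of this key
    have hrep : (pvOut l pref).any (fun sub => sub.contains p.1) = false := by
      rw [← Bool.not_eq_true, pv_repeats hnd hp]
      exact fun h => hmem h.1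
    have hpref_none : ∀ q ∈ pref, pvKey q.2 ≠ pvKey p.2 := by
      intro q hq hk
      exact hmem (by
        simp only [pvKeys, PySem.Set.mem_ofList, List.mem_map]
        exact ⟨q, hq, hk⟩)
    have hmatch : [p.1] ++ (l.filter (fun q =>
        p.1 != q.1 && PySem.Set.equal (PySem.Set.ofList p.2) (PySem.Set.ofList q.2))).map Prod.fst
        = pvGrp l (pvKey p.2) := by
      unfold pvGrp
      rw [hl, List.filter_append, List.filter_append, List.filter_cons, List.filter_cons]
      have e1 : pref.filter (fun q =>
          p.1 != q.1 && PySem.Set.equal (PySem.Set.ofList p.2) (PySem.Set.ofList q.2)) = [] := by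
        rw [List.filter_eq_nil_iff]
        intro q hq hc
        have := (pv_equal_iff_key p.2 q.2).mp (by
          revert hc
          cases PySem.Set.equal (PySem.Set.ofList p.2) (PySem.Set.ofList q.2) <;> simp)
        exact hpref_none q hq this.symm
      have e2 : pref.filter (fun q => pvKey q.2 == pvKey p.2) = [] := by
        rw [List.filter_eq_nil_iff]
        intro q hq hc
        exact hpref_none q hq (by simpa using hc)
      have e3 : (p.1 != p.1 && PySem.Set.equal (PySem.Set.ofList p.2) (PySem.Set.ofList p.2)) = false := by
        simp
      have e4 : (pvKey p.2 == pvKey p.2) = true := by simp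
      rw [e1, e2, e3, e4]
      have e5 : rest.filter (fun q =>
            p.1 != q.1 && PySem.Set.equal (PySem.Set.ofList p.2) (PySem.Set.ofList q.2))
          = rest.filter (fun q => pvKey q.2 == pvKey p.2) := by
        apply List.filter_congr
        intro q hq
        have hne : (p.1 != q.1) = true := by
          simp [pv_ne_rest hl hnd hq]
        rw [hne, Bool.true_and]
        rw [Bool.eq_iff_iff, pv_equal_iff_key, beq_iff_eq]
        exact eq_comm
      rw [e5]
      simp
  -- now both branches on the group size
    unfold pvBody
    rw [hrep]
    rw [if_pos rfl, pv_inner]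
    rw [hmatch]
    simp only [pvOut, hkeys, PySem.Set.add_of_not_mem hmem, List.map_append, List.filter_append]
    by_cases hlen : 1 < (pvGrp l (pvKey p.2)).length
    · simp [hlen]
    · simp [hlen]

theorem pv_A_fold {l : List (String × List Int)} (hnd : (l.map Prod.fst).Nodup) :
    ∀ (rest pref : List (String × List Int)), l = pref ++ rest →
      rest.foldl (pvBody l) (pvOut l pref) = pvOut l l := by
  intro rest
  induction rest with
  | nil => intro pref h; rw [List.foldl_nil]; simp at h; rw [h]
  | cons p t ih =>
    intro pref h
    rw [List.foldl_cons, pv_step h hnd]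
    exact ih (pref ++ [p]) (by simp [h])

theorem pv_A_eq (l : List (String × List Int)) (h : (l.map Prod.fst).Nodup) :
    compare_cluster_lists l = pvOut l l := by
  rw [pv_A_unfold]
  have h0 : pvOut l [] = [] := by simp [pvOut, pvKeys, PySem.Set.ofList_nil]
  calc l.foldl (pvBody l) [] = l.foldl (pvBody l) (pvOut l []) := by rw [h0]
    _ = pvOut l l := pv_A_fold h l [] (by simp)

-- ===== VERDICT (by name: the statement is the Claim_ definition above) =====
theorem compare_cluster_lists_spec : Claim_equal_compare_cluster_lists := by
  intro l _ hpre
  unfold Spec_compare_cluster_lists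
  rw [pv_A_eq l hpre, pv_B_eq l]
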